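-- pv_equiv track=rewrite | github.com/MODSetter/SurfSense | surfsense_backend/app/agents/new_chat_supervisor_baseline/deep_agent/connector_searchable.py | map_connectors_to_searchable_types
-- ===== SOURCE A (Python) =====
-- from typing import Any
--
-- _CONNECTOR_TYPE_TO_SEARCHABLE: dict[str, str] = {
--     "TAVILY_API": "TAVILY_API",
--     "LINKUP_API": "LINKUP_API",
--     "BAIDU_SEARCH_API": "BAIDU_SEARCH_API",
--     "SLACK_CONNECTOR": "SLACK_CONNECTOR",
--     "TEAMS_CONNECTOR": "TEAMS_CONNECTOR",
--     "NOTION_CONNECTOR": "NOTION_CONNECTOR",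
--     "GITHUB_CONNECTOR": "GITHUB_CONNECTOR",
--     "LINEAR_CONNECTOR": "LINEAR_CONNECTOR",
--     "DISCORD_CONNECTOR": "DISCORD_CONNECTOR",
--     "JIRA_CONNECTOR": "JIRA_CONNECTOR",
--     "CONFLUENCE_CONNECTOR": "CONFLUENCE_CONNECTOR",
--     "CLICKUP_CONNECTOR": "CLICKUP_CONNECTOR",
--     "GOOGLE_CALENDAR_CONNECTOR": "GOOGLE_CALENDAR_CONNECTOR",
--     "GOOGLE_GMAIL_CONNECTOR": "GOOGLE_GMAIL_CONNECTOR",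
--     "GOOGLE_DRIVE_CONNECTOR": "GOOGLE_DRIVE_FILE",
--     "AIRTABLE_CONNECTOR": "AIRTABLE_CONNECTOR",
--     "LUMA_CONNECTOR": "LUMA_CONNECTOR",
--     "ELASTICSEARCH_CONNECTOR": "ELASTICSEARCH_CONNECTOR",
--     "WEBCRAWLER_CONNECTOR": "CRAWLED_URL",
--     "BOOKSTACK_CONNECTOR": "BOOKSTACK_CONNECTOR",
--     "CIRCLEBACK_CONNECTOR": "CIRCLEBACK",
--     "OBSIDIAN_CONNECTOR": "OBSIDIAN_CONNECTOR",
--     "DROPBOX_CONNECTOR": "DROPBOX_FILE",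
--     "ONEDRIVE_CONNECTOR": "ONEDRIVE_FILE",
--     "COMPOSIO_GOOGLE_DRIVE_CONNECTOR": "GOOGLE_DRIVE_FILE",
--     "COMPOSIO_GMAIL_CONNECTOR": "GOOGLE_GMAIL_CONNECTOR",
--     "COMPOSIO_GOOGLE_CALENDAR_CONNECTOR": "GOOGLE_CALENDAR_CONNECTOR",
-- }
--
-- _ALWAYS_AVAILABLE_DOC_TYPES: tuple[str, ...] = (
--     "EXTENSION",
--     "FILE",
--     "NOTE",
--     "YOUTUBE_VIDEO",
-- )
--
-- def map_connectors_to_searchable_types(connector_types: list[Any]) -> list[str]: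
--     """Map connector types to searchable strings; dedupe preserving order."""
--     result_set: set[str] = set()
--     result_list: list[str] = []
--
--     for doc_type in _ALWAYS_AVAILABLE_DOC_TYPES:
--         if doc_type not in result_set:
--             result_set.add(doc_type)
--             result_list.append(doc_type)
--
--     for ct in connector_types:
--         ct_str = ct.value if hasattr(ct, "value") else str(ct)
--         searchable = _CONNECTOR_TYPE_TO_SEARCHABLE.get(ct_str)
--         if searchable and searchable not in result_set:
--             result_set.add(searchable)
--             result_list.append(searchable)
--
--     return result_list
-- ===== SOURCE B (Python) =====
-- _CONNECTOR_TYPE_TO_SEARCHABLE: dict[str, str] = {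
--     "TAVILY_API": "TAVILY_API",
--     "LINKUP_API": "LINKUP_API",
--     "BAIDU_SEARCH_API": "BAIDU_SEARCH_API",
--     "SLACK_CONNECTOR": "SLACK_CONNECTOR",
--     "TEAMS_CONNECTOR": "TEAMS_CONNECTOR",
--     "NOTION_CONNECTOR": "NOTION_CONNECTOR",
--     "GITHUB_CONNECTOR": "GITHUB_CONNECTOR",
--     "LINEAR_CONNECTOR": "LINEAR_CONNECTOR",
--     "DISCORD_CONNECTOR": "DISCORD_CONNECTOR",
--     "JIRA_CONNECTOR": "JIRA_CONNECTOR",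
--     "CONFLUENCE_CONNECTOR": "CONFLUENCE_CONNECTOR",
--     "CLICKUP_CONNECTOR": "CLICKUP_CONNECTOR",
--     "GOOGLE_CALENDAR_CONNECTOR": "GOOGLE_CALENDAR_CONNECTOR",
--     "GOOGLE_GMAIL_CONNECTOR": "GOOGLE_GMAIL_CONNECTOR",
--     "GOOGLE_DRIVE_CONNECTOR": "GOOGLE_DRIVE_FILE",
--     "AIRTABLE_CONNECTOR": "AIRTABLE_CONNECTOR",
--     "LUMA_CONNECTOR": "LUMA_CONNECTOR",
--     "ELASTICSEARCH_CONNECTOR": "ELASTICSEARCH_CONNECTOR",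
--     "WEBCRAWLER_CONNECTOR": "CRAWLED_URL",
--     "BOOKSTACK_CONNECTOR": "BOOKSTACK_CONNECTOR",
--     "CIRCLEBACK_CONNECTOR": "CIRCLEBACK",
--     "OBSIDIAN_CONNECTOR": "OBSIDIAN_CONNECTOR",
--     "DROPBOX_CONNECTOR": "DROPBOX_FILE",
--     "ONEDRIVE_CONNECTOR": "ONEDRIVE_FILE",
--     "COMPOSIO_GOOGLE_DRIVE_CONNECTOR": "GOOGLE_DRIVE_FILE",
--     "COMPOSIO_GMAIL_CONNECTOR": "GOOGLE_GMAIL_CONNECTOR",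
--     "COMPOSIO_GOOGLE_CALENDAR_CONNECTOR": "GOOGLE_CALENDAR_CONNECTOR",
-- }
--
-- _ALWAYS_AVAILABLE_DOC_TYPES: tuple[str, ...] = (
--     "EXTENSION",
--     "FILE",
--     "NOTE",
--     "YOUTUBE_VIDEO",
-- )
--
--
-- def _uniq(xs):
--     """Order-preserving dedup by recursion: keep the head, strip every later
--     copy of it from the tail, recurse on what is left.  No seen-set is kept;
--     the recursion depth is the number of distinct values (bounded here by the
--     table's value set plus the four always-available types)."""
--     if not xs:
--         return []
--     head = xs[0]
--     return [head] + _uniq([x for x in xs[1:] if x != head])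
--
--
-- def map_connectors_to_searchable_types(connector_types):
--     """Map connector types to searchable strings; dedupe preserving order."""
--     mapped = [
--         _CONNECTOR_TYPE_TO_SEARCHABLE.get(
--             ct.value if hasattr(ct, "value") else str(ct)
--         )
--         for ct in connector_types
--     ]
--     candidates = list(_ALWAYS_AVAILABLE_DOC_TYPES) + [s for s in mapped if s]
--     return _uniq(candidates)
-- ===== Notes on version B (the rewrite author's own statement) =====
-- stated objective: alternative
-- what changed: Replaces A's single interleaved loop with a seen-set and result-list by a staged pipeline: map connector types through the table into a candidate list, then deduplicate it with a recursive filter-ahead uniq (keep the head, delete its later copies from the tail, recurse) that maintains no auxiliary seen structure at all.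
import Mathlib
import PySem

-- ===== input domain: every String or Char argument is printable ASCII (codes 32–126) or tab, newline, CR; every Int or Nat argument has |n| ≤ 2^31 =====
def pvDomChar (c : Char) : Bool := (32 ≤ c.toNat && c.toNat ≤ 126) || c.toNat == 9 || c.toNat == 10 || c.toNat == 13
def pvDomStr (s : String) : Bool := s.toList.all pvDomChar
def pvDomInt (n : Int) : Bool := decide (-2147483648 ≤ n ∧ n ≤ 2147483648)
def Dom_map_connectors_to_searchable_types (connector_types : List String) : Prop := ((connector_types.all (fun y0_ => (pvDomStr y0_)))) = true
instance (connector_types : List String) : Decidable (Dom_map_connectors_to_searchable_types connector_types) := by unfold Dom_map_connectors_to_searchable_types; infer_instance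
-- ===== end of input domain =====

-- B replaces A's interleaved seen-set/result-list loop by a staged pipeline:
-- map connectors through the table into a candidate list, then deduplicate it
-- with a recursive filter-ahead uniq that keeps no seen structure (objective: alternative).

-- shared module constants
def pvTable : PySem.Dict String String := PySem.Dict.ofList [
  ("TAVILY_API", "TAVILY_API"),
  ("LINKUP_API", "LINKUP_API"),
  ("BAIDU_SEARCH_API", "BAIDU_SEARCH_API"),
  ("SLACK_CONNECTOR", "SLACK_CONNECTOR"),
  ("TEAMS_CONNECTOR", "TEAMS_CONNECTOR"),
  ("NOTION_CONNECTOR", "NOTION_CONNECTOR"),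
  ("GITHUB_CONNECTOR", "GITHUB_CONNECTOR"),
  ("LINEAR_CONNECTOR", "LINEAR_CONNECTOR"),
  ("DISCORD_CONNECTOR", "DISCORD_CONNECTOR"),
  ("JIRA_CONNECTOR", "JIRA_CONNECTOR"),
  ("CONFLUENCE_CONNECTOR", "CONFLUENCE_CONNECTOR"),
  ("CLICKUP_CONNECTOR", "CLICKUP_CONNECTOR"),
  ("GOOGLE_CALENDAR_CONNECTOR", "GOOGLE_CALENDAR_CONNECTOR"),
  ("GOOGLE_GMAIL_CONNECTOR", "GOOGLE_GMAIL_CONNECTOR"),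
  ("GOOGLE_DRIVE_CONNECTOR", "GOOGLE_DRIVE_FILE"),
  ("AIRTABLE_CONNECTOR", "AIRTABLE_CONNECTOR"),
  ("LUMA_CONNECTOR", "LUMA_CONNECTOR"),
  ("ELASTICSEARCH_CONNECTOR", "ELASTICSEARCH_CONNECTOR"),
  ("WEBCRAWLER_CONNECTOR", "CRAWLED_URL"),
  ("BOOKSTACK_CONNECTOR", "BOOKSTACK_CONNECTOR"),
  ("CIRCLEBACK_CONNECTOR", "CIRCLEBACK"),
  ("OBSIDIAN_CONNECTOR", "OBSIDIAN_CONNECTOR"),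
  ("DROPBOX_CONNECTOR", "DROPBOX_FILE"),
  ("ONEDRIVE_CONNECTOR", "ONEDRIVE_FILE"),
  ("COMPOSIO_GOOGLE_DRIVE_CONNECTOR", "GOOGLE_DRIVE_FILE"),
  ("COMPOSIO_GMAIL_CONNECTOR", "GOOGLE_GMAIL_CONNECTOR"),
  ("COMPOSIO_GOOGLE_CALENDAR_CONNECTOR", "GOOGLE_CALENDAR_CONNECTOR")]

def pvAlways : List String := ["EXTENSION", "FILE", "NOTE", "YOUTUBE_VIDEO"]

-- ===== PORT A =====
-- A's first loop: add doc_type to (result_set, result_list) if unseen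
def pvAStep1 (st : PySem.Set String × List String) (dt : String) :
    PySem.Set String × List String :=
  if st.1.contains dt then st else (st.1.add dt, st.2 ++ [dt])

-- A's second loop: ct is a str here, so ct_str = str(ct) = ct; `if searchable and … not in result_set`
def pvAStep2 (st : PySem.Set String × List String) (ct : String) :
    PySem.Set String × List String :=
  match pvTable.get? ct with
  | none => st
  | some s => if s != "" && !(st.1.contains s) then (st.1.add s, st.2 ++ [s]) else st

def map_connectors_to_searchable_types (connector_types : List String) : List String :=
  let st0 : PySem.Set String × List String := (PySem.Set.empty, [])
  let st1 := pvAlways.foldl pvAStep1 st0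
  let st2 := connector_types.foldl pvAStep2 st1
  st2.2

-- ===== PORT B =====
-- B's _uniq: keep the head, strip its later copies from the tail, recurse
def pvUniq : List String → List String
  | [] => []
  | x :: xs => x :: pvUniq (xs.filter (fun y => y != x))
termination_by xs => xs.length
decreasing_by simpa using Nat.lt_succ_of_le (List.length_filter_le _ _)

def map_connectors_to_searchable_types_alt (connector_types : List String) : List String :=
  let mapped := connector_types.map (fun ct => pvTable.get? ct)
  let candidates := pvAlways ++ mapped.filterMap (fun o =>
    match o with
    | some s => if s != "" then some s else none   -- `if s` on an Optional[str]
    | none => none)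
  pvUniq candidates

-- ===== PRECONDITION & SPEC =====
def Spec_map_connectors_to_searchable_types (connector_types : List String) (out : List String) : Prop := out = map_connectors_to_searchable_types_alt connector_types
instance (connector_types : List String) (out : List String) : Decidable (Spec_map_connectors_to_searchable_types connector_types out) := by unfold Spec_map_connectors_to_searchable_types; infer_instance

-- ===== CLAIM (what is proved, stated in full; the proofs are below) =====
def Claim_equal_map_connectors_to_searchable_types : Prop := ∀ (connector_types : List String), Dom_map_connectors_to_searchable_types connector_types → Spec_map_connectors_to_searchable_types connector_types (map_connectors_to_searchable_types connector_types)

-- ===== LEMMAS AND PROOFS =====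

-- the value B keeps for one connector type (what A's second loop conditionally adds)
def pvF (ct : String) : Option String :=
  match pvTable.get? ct with
  | none => none
  | some s => if s != "" then some s else none

lemma pvAStep1_diag (s : PySem.Set String) (x : String) :
    pvAStep1 (s, s) x = (PySem.Set.add s x, PySem.Set.add s x) := by
  simp only [pvAStep1, PySem.Set.add]
  split <;> simp_all

lemma pvA_loop1 (L : List String) (s : PySem.Set String) :
    L.foldl pvAStep1 (s, s) = (L.foldl PySem.Set.add s, L.foldl PySem.Set.add s) := by
  induction L generalizing s with
  | nil => rfl
  | cons x xs ih => simp [List.foldl_cons, pvAStep1_diag, ih]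

lemma pvAStep2_diag (s : PySem.Set String) (ct : String) :
    pvAStep2 (s, s) ct = match pvF ct with
      | none => (s, s)
      | some v => (PySem.Set.add s v, PySem.Set.add s v) := by
  simp only [pvAStep2, pvF]
  cases pvTable.get? ct with
  | none => rfl
  | some v =>
    by_cases hv : (v != "") = true
    · simp only [hv, Bool.true_and]
      by_cases hm : v ∈ s <;> simp [PySem.Set.add, hm]
    · simp_all

lemma pvA_loop2 (L : List String) (s : PySem.Set String) :
    L.foldl pvAStep2 (s, s) =
      ((L.filterMap pvF).foldl PySem.Set.add s, (L.filterMap pvF).foldl PySem.Set.add s) := by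
  induction L generalizing s with
  | nil => rfl
  | cons x xs ih =>
    simp only [List.foldl_cons, List.filterMap_cons, pvAStep2_diag]
    cases pvF x <;> simp [ih]

-- A's seen-set fold over any list equals B's filter-ahead uniq of the unseen part
lemma pvFoldl_add_eq_uniq (L : List String) (acc : List String) :
    L.foldl PySem.Set.add acc = acc ++ pvUniq (L.filter (fun y => !(acc.contains y))) := by
  induction L generalizing acc with
  | nil => simp [pvUniq]
  | cons x xs ih =>
    by_cases hx : acc.contains x
    · have hadd : PySem.Set.add acc x = acc := by
        simp [PySem.Set.add]; simp_all
      simp only [List.foldl_cons, List.filter_cons, hadd, hx, Bool.not_true,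
        Bool.false_eq_true, if_false, ih]
    · have hadd : PySem.Set.add acc x = acc ++ [x] := by
        simp [PySem.Set.add]; simp_all
      simp only [List.foldl_cons, List.filter_cons, hadd, hx, Bool.not_false, if_true]
      rw [ih]
      have hf : xs.filter (fun y => !((acc ++ [x]).contains y)) =
          (xs.filter (fun y => !acc.contains y)).filter (fun y => y != x) := by
        rw [List.filter_filter]
        apply List.filter_congr
        intro y _
        by_cases hyx : y = x <;> simp [bne, hyx]
      rw [hf]
      simp [pvUniq]

lemma pvB_candidates (cts : List String) :
    (cts.map (fun ct => pvTable.get? ct)).filterMap (fun o =>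
      match o with
      | some s => if s != "" then some s else none
      | none => none) = cts.filterMap pvF := by
  rw [List.filterMap_map]
  apply List.filterMap_congr
  intro ct _
  simp only [pvF, Function.comp]
  cases pvTable.get? ct <;> rfl

-- ===== VERDICT (by name: the statement is the Claim_ definition above) =====
theorem map_connectors_to_searchable_types_spec : Claim_equal_map_connectors_to_searchable_types := by
  intro cts _
  show map_connectors_to_searchable_types cts = map_connectors_to_searchable_types_alt cts
  simp only [map_connectors_to_searchable_types, map_connectors_to_searchable_types_alt]
  rw [pvB_candidates]
  have h0 : (PySem.Set.empty : PySem.Set String) = ([] : List String) := rfl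
  rw [h0, pvA_loop1, pvA_loop2, ← List.foldl_append, pvFoldl_add_eq_uniq]
  simp
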